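-- pv_equiv track=rewrite | github.com/DanielCortild/Google-KickStart | 2020/2020G-3.py | coef
-- ===== SOURCE A (Python) =====
-- import math
--
-- res = [[-1 for i in range(5001)] for n in range(5001)]
--
-- def coef(i, n):
--   if n == 1 or i < 0 or i > n:
--     return 0
--   if(res[i][n] == -1):
--     first_last = 0
--     if i == 0 or i == n-1:
--       first_last = 1
--     else:
--       first_last = 2
--     res[i][n] = i*coef(i-1, n-1)+(n-i-1)*coef(i, n-1)+first_last*math.factorial(n-2)
--   return res[i][n]
-- ===== SOURCE B (Python) =====
-- import math
--
-- def coef(i, n):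
--     if n == 1 or i < 0 or i > n:
--         return 0
--     # bottom-up DP over columns m = 2..n, keeping only the previous column
--     prev = [0] * (i + 1)          # prev[j] = coef(j, m-1), 0 where out of range
--     fact = 1                      # (m-2)! maintained incrementally
--     for m in range(2, n + 1):
--         prev = [(j * (prev[j - 1] if j >= 1 else 0)
--                  + (m - j - 1) * prev[j]
--                  + (1 if j == 0 or j == m - 1 else 2) * fact) if j <= m else 0
--                 for j in range(i + 1)]
--         fact *= m - 1
--     return prev[i]
-- ===== Notes on version B (the rewrite author's own statement) =====
-- stated objective: alternative
-- what changed: Replaces the memoized top-down recursion over a global 5001x5001 table by a bottom-up DP that sweeps columns m=2..n keeping only the previous column and a running factorial, O(i) extra space instead of the global table.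
-- outside the precondition, e.g. on coef(0, 0): A raises ValueError, B returns 0
import Mathlib
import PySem

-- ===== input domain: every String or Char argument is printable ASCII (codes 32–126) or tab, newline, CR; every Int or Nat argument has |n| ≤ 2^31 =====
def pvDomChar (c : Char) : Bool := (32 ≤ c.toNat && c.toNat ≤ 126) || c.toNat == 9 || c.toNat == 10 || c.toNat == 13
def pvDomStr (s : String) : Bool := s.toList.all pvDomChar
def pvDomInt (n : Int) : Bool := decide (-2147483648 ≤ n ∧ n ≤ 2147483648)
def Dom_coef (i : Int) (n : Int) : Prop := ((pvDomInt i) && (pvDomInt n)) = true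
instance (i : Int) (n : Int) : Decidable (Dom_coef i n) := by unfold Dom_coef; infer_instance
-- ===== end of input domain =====

-- B replaces A's memoized top-down recursion by a bottom-up column sweep with a running
-- factorial, keeping only the previous column (alternative decomposition, O(i) space).

-- ===== PORT A =====
-- Literal port of A's recursion including its memo table: Python's global 'res' array (cell
-- -1 = unfilled) becomes an explicitly threaded map (absent key = unfilled), which caches the
-- same pure values, so the returned value is unchanged. 'Nat.factorial (n-2).toNat' is exact
-- for n ≥ 2; Python raises ValueError for n < 2 there (excluded by Pre_coef).
def coefGo (i : Int) (n : Int) (res : Std.HashMap (Int × Int) Int) :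
    Int × Std.HashMap (Int × Int) Int :=
  if n = 1 ∨ i < 0 ∨ i > n then (0, res)
  else
    match res[(i, n)]? with
    | some v => (v, res)
    | none =>
      let first_last : Int := if i = 0 ∨ i = n - 1 then 1 else 2
      let p1 := coefGo (i - 1) (n - 1) res
      let p2 := coefGo i (n - 1) p1.2
      let v := i * p1.1 + (n - i - 1) * p2.1
        + first_last * ((Nat.factorial (n - 2).toNat : Nat) : Int)
      (v, p2.2.insert (i, n) v)
termination_by (n + 1).toNat
decreasing_by all_goals (push_neg at *; omega)

def coef (i : Int) (n : Int) : Int := (coefGo i n ∅).1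

-- ===== PORT B =====
def coef_alt (i : Int) (n : Int) : Int :=
  if n = 1 ∨ i < 0 ∨ i > n then 0
  else
    let st := (PySem.List.pyRange 2 (n + 1) 1).foldl
      (fun (st : List Int × Int) (m : Int) =>
        ((PySem.List.pyRange 0 (i + 1) 1).map (fun j =>
          if j ≤ m then
            j * (if 1 ≤ j then PySem.List.pyGetD st.1 (j - 1) 0 else 0)
              + (m - j - 1) * PySem.List.pyGetD st.1 j 0
              + (if j = 0 ∨ j = m - 1 then (1 : Int) else 2) * st.2
          else 0),
         st.2 * (m - 1)))
      (List.replicate (i + 1).toNat 0, 1)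
    PySem.List.pyGetD st.1 i 0

-- ===== PRECONDITION & SPEC =====
-- Pre_ excludes exactly the inputs where Python A raises: (i,n)=(0,0) (math.factorial(-2)
-- raises ValueError) and n > 5000 with 0 ≤ i ≤ n (IndexError on the fixed 5001×5001 table).
def Pre_coef (i : Int) (n : Int) : Prop :=
  n = 1 ∨ i < 0 ∨ i > n ∨ (2 ≤ n ∧ n ≤ 5000)
instance (i : Int) (n : Int) : Decidable (Pre_coef i n) := by unfold Pre_coef; infer_instance
def pvWitness_coef : Int × Int := (2, 4)
def Spec_coef (i : Int) (n : Int) (out : Int) : Prop := out = coef_alt i n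
instance (i : Int) (n : Int) (out : Int) : Decidable (Spec_coef i n out) := by unfold Spec_coef; infer_instance

-- ===== CLAIM (what is proved, stated in full; the proofs are below) =====
def Claim_equal_coef : Prop := ∀ (i : Int) (n : Int), Dom_coef i n → Pre_coef i n → Spec_coef i n (coef i n)

-- ===== LEMMAS AND PROOFS =====

-- A's recurrence without the memo table (proof helper)
def coefPlain (i : Int) (n : Int) : Int :=
  if n = 1 ∨ i < 0 ∨ i > n then 0
  else
    let first_last : Int := if i = 0 ∨ i = n - 1 then 1 else 2
    i * coefPlain (i - 1) (n - 1) + (n - i - 1) * coefPlain i (n - 1)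
      + first_last * ((Nat.factorial (n - 2).toNat : Nat) : Int)
termination_by (n + 1).toNat
decreasing_by all_goals (push_neg at *; omega)

def MemoOK (res : Std.HashMap (Int × Int) Int) : Prop :=
  ∀ j m v, res[(j, m)]? = some v → v = coefPlain j m

theorem coefPlain_of_guard (i n : Int) (h : n = 1 ∨ i < 0 ∨ i > n) : coefPlain i n = 0 := by
  rw [coefPlain.eq_def, if_pos h]

theorem coefGo_correct (k : Nat) : ∀ (i n : Int) (res : Std.HashMap (Int × Int) Int),
    (n + 1).toNat ≤ k → MemoOK res →
    (coefGo i n res).1 = coefPlain i n ∧ MemoOK (coefGo i n res).2 := by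
  induction k with
  | zero =>
      intro i n res hk hok
      have hn : n < 0 := by omega
      have hg : n = 1 ∨ i < 0 ∨ i > n := by omega
      rw [coefGo.eq_def, if_pos hg, coefPlain_of_guard i n hg]
      exact ⟨rfl, hok⟩
  | succ k ih =>
      intro i n res hk hok
      by_cases hg : n = 1 ∨ i < 0 ∨ i > n
      · rw [coefGo.eq_def, if_pos hg, coefPlain_of_guard i n hg]
        exact ⟨rfl, hok⟩
      · rw [coefGo.eq_def, if_neg hg]
        push_neg at hg
        have hn0 : 0 ≤ n := le_trans hg.2.1 hg.2.2
        have hlt : (n - 1 + 1).toNat ≤ k := by omega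
        cases hres : res[(i, n)]? with
        | some v =>
            simp only
            exact ⟨hok i n v hres, hok⟩
        | none =>
            simp only
            obtain ⟨h1, hok1⟩ := ih (i - 1) (n - 1) res hlt hok
            obtain ⟨h2, hok2⟩ := ih i (n - 1) (coefGo (i - 1) (n - 1) res).2 hlt hok1
            have hplain : coefPlain i n = i * coefPlain (i - 1) (n - 1)
                + (n - i - 1) * coefPlain i (n - 1)
                + (if i = 0 ∨ i = n - 1 then (1 : Int) else 2)
                  * ((Nat.factorial (n - 2).toNat : Nat) : Int) := by
              rw [coefPlain.eq_def, if_neg (by push_neg; exact hg)]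
            have hval : i * (coefGo (i - 1) (n - 1) res).1
                + (n - i - 1) * (coefGo i (n - 1) (coefGo (i - 1) (n - 1) res).2).1
                + (if i = 0 ∨ i = n - 1 then (1 : Int) else 2)
                  * ((Nat.factorial (n - 2).toNat : Nat) : Int) = coefPlain i n := by
              rw [h1, h2, hplain]
            refine ⟨hval, ?_⟩
            intro j m w hw
            rw [Std.HashMap.getElem?_insert] at hw
            simp only [beq_iff_eq] at hw
            by_cases hkey : (i, n) = (j, m)
            · injection hkey with hkj hkm
              subst hkj; subst hkm
              rw [if_pos rfl] at hw
              rw [← Option.some.inj hw, ← hval]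
            · rw [if_neg hkey] at hw
              exact hok2 j m w hw

theorem coef_eq_plain (i n : Int) : coef i n = coefPlain i n := by
  have hok : MemoOK (∅ : Std.HashMap (Int × Int) Int) := by
    intro j m v hv
    simp at hv
  exact (coefGo_correct (n + 1).toNat i n ∅ le_rfl hok).1

-- B's loop body and loop state, named for the proofs (definitionally the fold in coef_alt)
def altStep (i : Int) (st : List Int × Int) (m : Int) : List Int × Int :=
  ((PySem.List.pyRange 0 (i + 1) 1).map (fun j =>
    if j ≤ m then
      j * (if 1 ≤ j then PySem.List.pyGetD st.1 (j - 1) 0 else 0)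
        + (m - j - 1) * PySem.List.pyGetD st.1 j 0
        + (if j = 0 ∨ j = m - 1 then (1 : Int) else 2) * st.2
    else 0),
   st.2 * (m - 1))

def altState (i : Int) (n : Int) : List Int × Int :=
  (PySem.List.pyRange 2 (n + 1) 1).foldl (altStep i) (List.replicate (i + 1).toNat 0, 1)

theorem coef_alt_eq_state (i n : Int) (h : ¬(n = 1 ∨ i < 0 ∨ i > n)) :
    coef_alt i n = PySem.List.pyGetD (altState i n).1 i 0 := by
  rw [coef_alt, if_neg h]; rfl


-- loop invariant: after processing columns 2..m, the state holds column m of A and (m-1)!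
theorem altState_spec (i : Int) (m : Int) (hm : 1 ≤ m) :
    altState i m = ((PySem.List.pyRange 0 (i + 1) 1).map (fun j => coefPlain j m),
                    ((Nat.factorial (m - 1).toNat : Nat) : Int)) := by
  induction m, hm using Int.le_induction with
  | base =>
      have hmap : (PySem.List.pyRange 0 (i + 1) 1).map (fun j => coefPlain j 1)
          = List.replicate (i + 1).toNat 0 := by
        have : ∀ j ∈ PySem.List.pyRange 0 (i + 1) 1, coefPlain j 1 = 0 := by
          intro j _; exact coefPlain_of_guard j 1 (Or.inl rfl)
        rw [List.map_congr_left this, List.map_const', PySem.List.length_pyRange_one]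
        norm_num
      simp [altState, hmap]
  | succ m hm ih =>
      have hsplit : PySem.List.pyRange 2 (m + 1 + 1) 1
          = PySem.List.pyRange 2 (m + 1) 1 ++ [m + 1] :=
        PySem.List.pyRange_one_succ_right (by omega)
      have hfold : altState i (m + 1) = altStep i (altState i m) (m + 1) := by
        rw [altState, hsplit, List.foldl_append, List.foldl_cons, List.foldl_nil]; rfl
      rw [hfold, ih, altStep, Prod.mk.injEq]
      refine ⟨?_, ?_⟩
      · -- first component: each entry equals coef j (m+1)
        refine List.map_congr_left ?_
        intro j hj
        rw [PySem.List.mem_pyRange_one] at hj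
        obtain ⟨hj0, hji⟩ := hj
        by_cases hjm : j ≤ m + 1
        · have hng : ¬(m + 1 = 1 ∨ j < 0 ∨ j > m + 1) := by omega
          rw [if_pos hjm, coefPlain.eq_def, if_neg hng]
          have hgj : PySem.List.pyGetD
              ((PySem.List.pyRange 0 (i + 1) 1).map (fun j => coefPlain j m)) j 0 = coefPlain j m :=
            PySem.List.pyGetD_map_pyRange_of_nonneg _ _ _ _ hj0 hji
          have hfact : (m + 1 - 2).toNat = (m - 1).toNat := by omega
          by_cases hj1 : 1 ≤ j
          · have hgj' : PySem.List.pyGetD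
                ((PySem.List.pyRange 0 (i + 1) 1).map (fun j => coefPlain j m)) (j - 1) 0
                = coefPlain (j - 1) m :=
              PySem.List.pyGetD_map_pyRange_of_nonneg _ _ _ _ (by omega) (by omega)
            simp only [hgj, hgj', hfact, if_pos hj1]
            ring_nf
          · have hj00 : j = 0 := by omega
            subst hj00
            simp only [hgj, hfact, if_neg hj1]
            ring_nf
        · rw [if_neg hjm, coefPlain_of_guard j (m + 1) (by omega)]
      · -- second component: running factorial
        have h1 : (m + 1 - 1).toNat = (m - 1).toNat + 1 := by omega
        have h2 : ((m - 1).toNat + 1 : Int) = m := by omega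
        rw [h1, Nat.factorial_succ]
        push_cast
        rw [h2]
        ring

-- ===== VERDICT (by name: the statement is the Claim_ definition above) =====
theorem coef_spec : Claim_equal_coef := by
  intro i n _ hpre
  unfold Spec_coef
  rw [coef_eq_plain]
  by_cases hg : n = 1 ∨ i < 0 ∨ i > n
  · rw [coefPlain_of_guard i n hg, coef_alt, if_pos hg]
  · push_neg at hg
    have hn2 : 2 ≤ n := by
      rcases hpre with h | h | h | h
      · exact absurd h hg.1
      · omega
      · omega
      · exact h.1
    rw [coef_alt_eq_state i n (by push_neg; exact hg),
        altState_spec i n (by omega)]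
    exact (PySem.List.pyGetD_map_pyRange_of_nonneg (fun j => coefPlain j n) (i+1) i 0 hg.2.1 (by omega)).symm
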